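-- pv_equiv track=rewrite | github.com/aeolyus/adventofcode | 2020/day14/sol.py | generateAllBinaryStrings
-- ===== SOURCE A (Python) =====
-- def generateAllBinaryStrings(n, arr, x, x_indices):
--     if x >= len(x_indices):
--         yield "".join(arr)
--         return
--     i = x_indices[x]
--     arr[i] = "0"
--     yield from generateAllBinaryStrings(n, arr[:], x + 1, x_indices)
--
--     i = x_indices[x]
--     arr[i] = "1"
--     yield from generateAllBinaryStrings(n, arr[:], x + 1, x_indices)
-- ===== SOURCE B (Python) =====
-- import itertools
--
-- def generateAllBinaryStrings(n, arr, x, x_indices):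
--     idxs = [x_indices[j] for j in range(x, len(x_indices))]
--     for bits in itertools.product("01", repeat=len(idxs)):
--         copy = list(arr)
--         for i, b in zip(idxs, bits):
--             copy[i] = b
--         yield "".join(copy)
-- ===== Notes on version B (the rewrite author's own statement) =====
-- stated objective: alternative
-- what changed: Replaces A's two-way recursive generator (branching 0/1 per floating position with array copies) by a flat iteration over the Cartesian product of bits: collect the remaining indices once, then for each bit tuple patch a fresh copy of arr and join it.
import Mathlib
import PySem

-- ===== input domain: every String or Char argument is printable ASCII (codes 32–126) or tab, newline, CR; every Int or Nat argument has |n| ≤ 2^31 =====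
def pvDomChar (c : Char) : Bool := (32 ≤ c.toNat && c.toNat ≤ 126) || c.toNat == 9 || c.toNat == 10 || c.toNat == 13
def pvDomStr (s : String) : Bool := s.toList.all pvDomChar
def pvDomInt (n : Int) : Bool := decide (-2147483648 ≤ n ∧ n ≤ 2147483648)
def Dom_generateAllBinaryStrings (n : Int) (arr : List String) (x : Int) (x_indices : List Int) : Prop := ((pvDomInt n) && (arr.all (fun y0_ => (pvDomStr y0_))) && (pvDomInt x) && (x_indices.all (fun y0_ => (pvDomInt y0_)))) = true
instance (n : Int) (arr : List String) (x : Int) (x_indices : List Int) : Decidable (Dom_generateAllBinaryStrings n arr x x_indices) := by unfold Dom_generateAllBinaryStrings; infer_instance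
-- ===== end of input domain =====

-- B replaces A's two-way recursive generator by one flat pass over the Cartesian product
-- of bits (objective: idiomatic/alternative decomposition; same output list, return value only —
-- A mutates its arr argument, B does not).

-- ===== PORT A =====
-- literal transliteration of A's recursive generator; the `none` branch is Python's
-- IndexError (excluded by Pre_), pySetD is arr[i] = … (IndexError outside Pre_)
def generateAllBinaryStrings (n : Int) (arr : List String) (x : Int) (x_indices : List Int) : List String :=
  if _h : ((x_indices.length : Int)) ≤ x then [PySem.Str.join "" arr]
  else
    match PySem.List.pyGet? x_indices x with
    | none => []
    | some i =>
      let arr0 := PySem.List.pySetD arr i "0"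
      let l0 := generateAllBinaryStrings n arr0 (x + 1) x_indices
      let arr1 := PySem.List.pySetD arr0 i "1"
      let l1 := generateAllBinaryStrings n arr1 (x + 1) x_indices
      l0 ++ l1
termination_by ((x_indices.length : Int) - x).toNat
decreasing_by all_goals omega

-- ===== PORT B =====
-- idxs = [x_indices[j] for j in range(x, len(x_indices))]; the .getD 0 arm is Python's
-- IndexError (excluded by Pre_)
def gabsIdxs (x : Int) (x_indices : List Int) : List Int :=
  (PySem.List.pyRange x (x_indices.length : Int) 1).map
    (fun j => (PySem.List.pyGet? x_indices j).getD 0)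

-- itertools.product("01", repeat=k): leftmost position varies slowest
def gabsProd : Nat → List (List String)
  | 0 => [[]]
  | k + 1 => (gabsProd k).map (fun t => "0" :: t) ++ (gabsProd k).map (fun t => "1" :: t)

def generateAllBinaryStrings_alt (n : Int) (arr : List String) (x : Int) (x_indices : List Int) : List String :=
  let idxs := gabsIdxs x x_indices
  (gabsProd idxs.length).map (fun bits =>
    PySem.Str.join ""
      ((idxs.zip bits).foldl (fun copy ib => PySem.List.pySetD copy ib.1 ib.2) arr))

-- ===== PRECONDITION & SPEC =====
-- Pre_ excludes exactly the inputs on which A raises IndexError: x below -len(x_indices)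
-- while x < len(x_indices), or some processed element of x_indices out of range for arr
-- (for negative x, A wraps around and processes every element of x_indices).
def Pre_generateAllBinaryStrings (n : Int) (arr : List String) (x : Int) (x_indices : List Int) : Prop :=
  ((x_indices.length : Int) ≤ x) ∨
  (0 ≤ x ∧ ∀ i ∈ x_indices.drop x.toNat, PySem.Raise.InRange arr.length i) ∨
  (-(x_indices.length : Int) ≤ x ∧ x < 0 ∧ ∀ i ∈ x_indices, PySem.Raise.InRange arr.length i)
instance (n : Int) (arr : List String) (x : Int) (x_indices : List Int) : Decidable (Pre_generateAllBinaryStrings n arr x x_indices) := by unfold Pre_generateAllBinaryStrings; infer_instance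

def pvWitness_generateAllBinaryStrings : Int × List String × Int × List Int := (2, ["X", "1"], 0, [0])

def Spec_generateAllBinaryStrings (n : Int) (arr : List String) (x : Int) (x_indices : List Int) (out : List String) : Prop := out = generateAllBinaryStrings_alt n arr x x_indices
instance (n : Int) (arr : List String) (x : Int) (x_indices : List Int) (out : List String) : Decidable (Spec_generateAllBinaryStrings n arr x x_indices out) := by unfold Spec_generateAllBinaryStrings; infer_instance

-- ===== CLAIM (what is proved, stated in full; the proofs are below) =====
def Claim_equal_generateAllBinaryStrings : Prop := ∀ (n : Int) (arr : List String) (x : Int) (x_indices : List Int), Dom_generateAllBinaryStrings n arr x x_indices → Pre_generateAllBinaryStrings n arr x x_indices → Spec_generateAllBinaryStrings n arr x x_indices (generateAllBinaryStrings n arr x x_indices)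

-- ===== LEMMAS AND PROOFS =====

theorem pySetD_pySetD_same {α : Type} (xs : List α) (i : Int) (v w : α) :
    PySem.List.pySetD (PySem.List.pySetD xs i v) i w = PySem.List.pySetD xs i w := by
  simp only [PySem.List.pySetD, PySem.List.pySet?]
  cases h : PySem.List.pyIdx? xs.length i with
  | none => simp [h]
  | some k => simp [h, List.length_set, List.set_set]

theorem gabs_key (n : Int) (x_indices : List Int) :
    ∀ (fuel : Nat) (x : Int) (arr : List String),
      ((x_indices.length : Int) - x).toNat = fuel →
      -(x_indices.length : Int) ≤ x →
      generateAllBinaryStrings n arr x x_indices =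
        (gabsProd (gabsIdxs x x_indices).length).map (fun bits =>
          PySem.Str.join ""
            (((gabsIdxs x x_indices).zip bits).foldl
              (fun copy ib => PySem.List.pySetD copy ib.1 ib.2) arr)) := by
  intro fuel
  induction fuel with
  | zero =>
    intro x arr hf hx
    have hle : (x_indices.length : Int) ≤ x := by omega
    rw [generateAllBinaryStrings]
    simp [hle, gabsIdxs, PySem.List.pyRange_one_eq_nil hle, gabsProd]
  | succ k ih =>
    intro x arr hf hx
    by_cases hle : (x_indices.length : Int) ≤ x
    · rw [generateAllBinaryStrings]
      simp [hle, gabsIdxs, PySem.List.pyRange_one_eq_nil hle, gabsProd]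
    · have hlt : x < (x_indices.length : Int) := by omega
      cases hg : PySem.List.pyGet? x_indices x with
      | none =>
        exfalso
        rw [PySem.List.pyGet?_eq_none_iff] at hg
        exact hg (by constructor <;> omega)
      | some i =>
        have hf0 : ((x_indices.length : Int) - (x + 1)).toNat = k := by omega
        have hx1 : -(x_indices.length : Int) ≤ x + 1 := by omega
        have hidx : gabsIdxs x x_indices = i :: gabsIdxs (x + 1) x_indices := by
          unfold gabsIdxs
          rw [PySem.List.pyRange_one_cons hlt]
          simp [hg]
        rw [generateAllBinaryStrings]
        simp only [dif_neg hle, hg]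
        rw [ih (x + 1) (PySem.List.pySetD arr i "0") hf0 hx1,
            ih (x + 1) (PySem.List.pySetD (PySem.List.pySetD arr i "0") i "1") hf0 hx1,
            pySetD_pySetD_same]
        rw [hidx]
        simp only [List.length_cons, gabsProd, List.map_append, List.map_map]
        congr 1

-- ===== VERDICT (by name: the statement is the Claim_ definition above) =====
theorem generateAllBinaryStrings_spec : Claim_equal_generateAllBinaryStrings := by
  intro n arr x x_indices _hdom hpre
  unfold Spec_generateAllBinaryStrings generateAllBinaryStrings_alt
  have hx : -(x_indices.length : Int) ≤ x := by
    rcases hpre with h | ⟨h, _⟩ | ⟨h, _, _⟩ <;> omega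
  exact gabs_key n x_indices _ x arr rfl hx
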